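-- pv_equiv track=rewrite | github.com/Marvinmw/probing_analysis_tosem | graph_tasks/utils/alignment.py | normalization_code
-- ===== SOURCE A (Python) =====
-- from itertools import groupby
--
-- def splitWithIndices(s, c=' '):
--     p = 0
--     for k, g in groupby(s, lambda x:x.isspace()):
--         q = p + sum(1 for i in g)
--         if not k:
--          yield p, q # or p, q-1 if you are really sure you want that
--         p = q
--
-- def normalization_code(code_src):
--     words_index = list(splitWithIndices(code_src))
--     clean_word_index = []
--     for w in words_index:
--         if code_src[w[0]:w[1]].strip():
--             clean_word_index.append(w)
--     words_index = clean_word_index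
--     index_map = {}
--     count = 0
--     for c, w in enumerate(words_index):
--         for i in range(w[0], w[1]):
--             index_map[i]=count
--             count += 1
--         count+=1 # space between two words
--
--     new_code = " ".join([ code_src[c:v] for (c,v) in words_index])
--     return index_map, new_code
-- ===== SOURCE B (Python) =====
-- def normalization_code(code_src):
--     # single pass: build index_map and the normalized text together
--     index_map = {}
--     buf = []
--     pos = 0
--     started = False      # some word character already emitted
--     prev_word = False    # previous char was a word character
--     for i, ch in enumerate(code_src):
--         if not ch.isspace():
--             if started and not prev_word:
--                 buf.append(' ')
--                 pos += 1
--             index_map[i] = pos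
--             buf.append(ch)
--             pos += 1
--             started = True
--             prev_word = True
--         else:
--             prev_word = False
--     return index_map, ''.join(buf)
-- ===== Notes on version B (the rewrite author's own statement) =====
-- stated objective: simpler
-- what changed: Replaced A's four phases (groupby run-finding, a redundant strip-filter, a dict-building double loop with a separate counter, and a separate join) by one single character pass that builds index_map and the normalized text together with one running position counter.
import Mathlib
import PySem

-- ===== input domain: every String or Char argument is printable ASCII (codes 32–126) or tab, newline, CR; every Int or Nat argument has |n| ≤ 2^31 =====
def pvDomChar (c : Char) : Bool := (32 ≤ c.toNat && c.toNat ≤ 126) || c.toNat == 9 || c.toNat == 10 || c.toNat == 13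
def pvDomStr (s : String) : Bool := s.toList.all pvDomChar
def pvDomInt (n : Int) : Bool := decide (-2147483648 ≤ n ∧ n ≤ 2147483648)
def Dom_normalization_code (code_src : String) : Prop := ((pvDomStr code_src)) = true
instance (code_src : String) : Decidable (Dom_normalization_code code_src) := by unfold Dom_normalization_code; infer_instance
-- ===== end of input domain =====

-- B replaces A's four phases (groupby run-finding, redundant strip-filter, dict-building double
-- loop with a separate counter, separate join) by one fused character pass (objective: simpler).

-- ===== PORT A =====
-- groupby(s, isspace) rendered as (key, run-length) pairs
def pvRunsAux (k : Bool) (n : Nat) : List Char → List (Bool × Nat)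
  | [] => [(k, n)]
  | c :: cs =>
    if PySem.Chars.isspace c = k then pvRunsAux k (n + 1) cs
    else (k, n) :: pvRunsAux (PySem.Chars.isspace c) 1 cs

def pvRuns : List Char → List (Bool × Nat)
  | [] => []
  | c :: cs => pvRunsAux (PySem.Chars.isspace c) 1 cs

-- the generator splitWithIndices: p starts at 0, q = p + len(run), yield (p, q) for non-space runs
def pvSplitWithIndices : List (Bool × Nat) → Int → List (Int × Int)
  | [], _ => []
  | (k, n) :: rest, p =>
      (if !k then [(p, p + (n : Int))] else []) ++ pvSplitWithIndices rest (p + (n : Int))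

def normalization_code (code_src : String) : (List (Int × Int)) × String :=
  let cs := code_src.toList
  let words_index := pvSplitWithIndices (pvRuns cs) 0
  let clean := words_index.foldl
    (fun acc w =>
      if PySem.Chars.strip (PySem.List.slice cs (some w.1) (some w.2)) ≠ [] then acc ++ [w]
      else acc) []
  let st := (PySem.List.enumerate clean).foldl
    (fun (st : PySem.Dict Int Int × Int) cw =>
      let st2 := (PySem.List.pyRange cw.2.1 cw.2.2).foldl
        (fun (st : PySem.Dict Int Int × Int) i => (st.1.insert i st.2, st.2 + 1)) st
      (st2.1, st2.2 + 1))
    (PySem.Dict.empty, 0)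
  let new_code := PySem.Chars.join [' ']
    (clean.map (fun w => PySem.List.slice cs (some w.1) (some w.2)))
  (st.1.items, String.ofList new_code)

-- ===== PORT B =====
def pvAltStep (st : PySem.Dict Int Int × List Char × Int × Bool × Bool) (ic : Int × Char) :
    PySem.Dict Int Int × List Char × Int × Bool × Bool :=
  let (d, buf, pos, started, prev) := st
  if PySem.Chars.isspace ic.2 = false then
    let bp := if started && !prev then (buf ++ [' '], pos + 1) else (buf, pos)
    (d.insert ic.1 bp.2, bp.1 ++ [ic.2], bp.2 + 1, true, true)
  else
    (d, buf, pos, started, false)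

def normalization_code_alt (code_src : String) : (List (Int × Int)) × String :=
  let st := (PySem.List.enumerate code_src.toList).foldl pvAltStep
    (PySem.Dict.empty, [], 0, false, false)
  (st.1.items, String.ofList st.2.1)

-- ===== PRECONDITION & SPEC =====
def Spec_normalization_code (code_src : String) (out : (List (Int × Int)) × String) : Prop := out = normalization_code_alt code_src
instance (code_src : String) (out : (List (Int × Int)) × String) : Decidable (Spec_normalization_code code_src out) := by unfold Spec_normalization_code; infer_instance

-- ===== CLAIM (what is proved, stated in full; the proofs are below) =====
def Claim_equal_normalization_code : Prop := ∀ (code_src : String), Dom_normalization_code code_src → Spec_normalization_code code_src (normalization_code code_src)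

-- ===== LEMMAS AND PROOFS =====

-- the word decomposition: maximal non-space runs with their start offsets
def pvWords : List Char → Int → List (Int × List Char)
  | [], _ => []
  | c :: cs, p =>
    if PySem.Chars.isspace c then pvWords cs (p + 1)
    else (p, c :: cs.takeWhile (fun x => !PySem.Chars.isspace x)) ::
      pvWords (cs.dropWhile (fun x => !PySem.Chars.isspace x))
        (p + 1 + ((cs.takeWhile (fun x => !PySem.Chars.isspace x)).length : Int))
  termination_by cs _ => cs.length
  decreasing_by
  · simp
  · have := List.length_dropWhile_le (fun x => !PySem.Chars.isspace x) cs
    simp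
    omega

def pvSpans (cs : List Char) (p : Int) : List (Int × Int) :=
  (pvWords cs p).map (fun qw => (qw.1, qw.1 + (qw.2.length : Int)))

def pvInsWord (d : PySem.Dict Int Int) (a pos : Int) : List Char → PySem.Dict Int Int
  | [] => d
  | _ :: t => pvInsWord (d.insert a pos) (a + 1) (pos + 1) t

-- common reference: one pass over the word list maintaining (dict, buffer, position)
def pvRefGo : List (Int × List Char) → PySem.Dict Int Int → List Char → Int → Bool →
    PySem.Dict Int Int × List Char × Int
  | [], d, buf, pos, _ => (d, buf, pos)
  | (a, w) :: rest, d, buf, pos, started =>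
      let buf1 := if started then buf ++ [' '] else buf
      let pos1 := if started then pos + 1 else pos
      pvRefGo rest (pvInsWord d a pos1 w) (buf1 ++ w) (pos1 + (w.length : Int)) true

lemma pvDropWhile_head {α : Type} (P : α → Bool) :
    ∀ (l : List α) (c : α) (t : List α), l.dropWhile P = c :: t → P c = false := by
  intro l
  induction l with
  | nil => intro c t h; simp [List.dropWhile] at h
  | cons x xs ih =>
      intro c t h
      by_cases hx : P x = true
      · rw [List.dropWhile_cons_of_pos hx] at h; exact ih c t h
      · rw [List.dropWhile_cons_of_neg hx] at h
        cases h; simpa using hx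

lemma pvDropWhile_all_false {α : Type} (P : α → Bool) (l : List α)
    (h : ∀ x ∈ l, P x = false) : l.dropWhile P = l := by
  cases l with
  | nil => rfl
  | cons x xs => rw [List.dropWhile_cons_of_neg (by simp [h x (by simp)])]

lemma pvStrip_eq (w : List Char) (h : ∀ c ∈ w, PySem.Chars.isspace c = false) :
    PySem.Chars.strip w = w := by
  unfold PySem.Chars.strip PySem.Chars.lstrip PySem.Chars.rstrip
  rw [pvDropWhile_all_false _ _ h,
      pvDropWhile_all_false _ _ (by intro x hx; exact h x (by simpa using hx)),
      List.reverse_reverse]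

lemma pvWords_mem (cs : List Char) (p : Int) : ∀ (q : Int) (w : List Char),
    (q, w) ∈ pvWords cs p →
    ∃ k : Nat, q = p + (k : Int) ∧ (cs.drop k).take w.length = w ∧ w ≠ [] ∧
      ∀ c ∈ w, PySem.Chars.isspace c = false := by
  induction cs, p using pvWords.induct with
  | case1 p => intro q w h; simp [pvWords] at h
  | case2 c cs p hc ih =>
      intro q w h
      rw [pvWords, if_pos hc] at h
      obtain ⟨k, hk, htk, hne, hns⟩ := ih q w h
      refine ⟨k + 1, by push_cast; omega, ?_, hne, hns⟩
      rw [List.drop_succ_cons]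
      exact htk
  | case3 c cs p hc ih =>
      intro q w h
      rw [pvWords, if_neg hc] at h
      simp only [List.mem_cons] at h
      rcases h with h | h
      · have hq : q = p := congrArg Prod.fst h
        have hw : w = c :: cs.takeWhile (fun x => !PySem.Chars.isspace x) := congrArg Prod.snd h
        subst hq; subst hw
        refine ⟨0, by omega, ?_, by simp, ?_⟩
        · simp only [List.drop_zero, List.length_cons, List.take_succ_cons]
          have hpre : (cs.takeWhile (fun x => !PySem.Chars.isspace x)) <+: cs :=
            List.takeWhile_prefix _
          rw [← List.prefix_iff_eq_take.mp hpre]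
        · intro x hx
          rcases List.mem_cons.mp hx with rfl | hx
          · simpa using hc
          · have := List.mem_takeWhile_imp hx; simpa using this
      · obtain ⟨k, hk, htk, hne, hns⟩ := ih q w h
        set tw := cs.takeWhile (fun x => !PySem.Chars.isspace x) with htw
        have hsplit : cs = tw ++ cs.dropWhile (fun x => !PySem.Chars.isspace x) := by
          rw [htw, List.takeWhile_append_dropWhile]
        refine ⟨k + tw.length + 1, by push_cast; omega, ?_, hne, hns⟩
        rw [List.drop_succ_cons]
        conv_lhs => rw [hsplit]
        rw [show k + tw.length = tw.length + k from by omega, ← List.drop_drop,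
            List.drop_left]
        exact htk

lemma pvSpans_space (c : Char) (cs : List Char) (hc : PySem.Chars.isspace c = true) (p : Int) :
    pvSpans (c :: cs) p = pvSpans cs (p + 1) := by
  unfold pvSpans; rw [pvWords, if_pos hc]

lemma pvSpans_word (c : Char) (cs : List Char) (hc : PySem.Chars.isspace c = false) (p : Int) :
    pvSpans (c :: cs) p =
      (p, p + 1 + ((cs.takeWhile (fun x => !PySem.Chars.isspace x)).length : Int)) ::
        pvSpans (cs.dropWhile (fun x => !PySem.Chars.isspace x))
          (p + 1 + ((cs.takeWhile (fun x => !PySem.Chars.isspace x)).length : Int)) := by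
  unfold pvSpans
  rw [pvWords, if_neg (by simp [hc])]
  simp only [List.map_cons, List.length_cons]
  push_cast
  ring_nf

lemma pvSplit_cons_true (n : Nat) (rest : List (Bool × Nat)) (p : Int) :
    pvSplitWithIndices ((true, n) :: rest) p = pvSplitWithIndices rest (p + (n : Int)) := by
  simp [pvSplitWithIndices]

lemma pvSplit_cons_false (n : Nat) (rest : List (Bool × Nat)) (p : Int) :
    pvSplitWithIndices ((false, n) :: rest) p =
      (p, p + (n : Int)) :: pvSplitWithIndices rest (p + (n : Int)) := by
  simp [pvSplitWithIndices]

-- A's splitWithIndices over groupby equals the span list of pvWords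
lemma pvRunsAux_split : ∀ (cs : List Char) (k : Bool) (n : Nat) (p : Int),
    pvSplitWithIndices (pvRunsAux k n cs) p =
      if k then pvSpans cs (p + (n : Int))
      else (p, p + (n : Int) + ((cs.takeWhile (fun x => !PySem.Chars.isspace x)).length : Int)) ::
        pvSpans (cs.dropWhile (fun x => !PySem.Chars.isspace x))
          (p + (n : Int) + ((cs.takeWhile (fun x => !PySem.Chars.isspace x)).length : Int)) := by
  intro cs
  induction cs with
  | nil =>
      intro k n p
      cases k <;>
        simp [pvRunsAux, pvSplitWithIndices, pvSpans, pvWords]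
  | cons c cs ih =>
      intro k n p
      cases hc : PySem.Chars.isspace c with
      | true =>
          cases k with
          | true =>
              rw [pvRunsAux, if_pos hc, ih true (n + 1) p, if_pos rfl, if_pos rfl,
                  pvSpans_space c cs hc]
              congr 1
              push_cast; ring
          | false =>
              rw [pvRunsAux, if_neg (by simp [hc]), hc, pvSplit_cons_false,
                  ih true 1 (p + (n : Int)), if_pos rfl, if_neg (by simp),
                  List.takeWhile_cons_of_neg (by simp [hc]),
                  List.dropWhile_cons_of_neg (by simp [hc]),
                  pvSpans_space c cs hc]
              simp only [List.length_nil]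
              push_cast
              ring_nf
      | false =>
          cases k with
          | true =>
              rw [pvRunsAux, if_neg (by simp [hc]), hc, pvSplit_cons_true,
                  ih false 1 (p + (n : Int)), if_neg (by simp), if_pos rfl,
                  pvSpans_word c cs hc]
              push_cast
              ring_nf
          | false =>
              rw [pvRunsAux, if_pos hc, ih false (n + 1) p, if_neg (by simp), if_neg (by simp),
                  List.takeWhile_cons_of_pos (by simp [hc]),
                  List.dropWhile_cons_of_pos (by simp [hc])]
              simp only [List.length_cons]
              push_cast
              ring_nf

lemma pvSplit_runs (cs : List Char) : pvSplitWithIndices (pvRuns cs) 0 = pvSpans cs 0 := by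
  cases cs with
  | nil => simp [pvRuns, pvSplitWithIndices, pvSpans, pvWords]
  | cons c cs =>
      rw [pvRuns]
      cases hc : PySem.Chars.isspace c with
      | true =>
          rw [pvRunsAux_split cs true 1 0, if_pos rfl, pvSpans_space c cs hc]
          norm_num
      | false =>
          rw [pvRunsAux_split cs false 1 0, if_neg (by simp), pvSpans_word c cs hc]
          push_cast
          ring_nf

lemma pvClean_keep (cs : List Char) :
    ∀ (l acc : List (Int × Int)),
      (∀ w ∈ l, PySem.Chars.strip (PySem.List.slice cs (some w.1) (some w.2)) ≠ []) →
      l.foldl (fun acc w =>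
        if PySem.Chars.strip (PySem.List.slice cs (some w.1) (some w.2)) ≠ [] then acc ++ [w]
        else acc) acc = acc ++ l := by
  intro l
  induction l with
  | nil => intro acc _; simp
  | cons x xs ih =>
      intro acc h
      simp only [List.foldl_cons, if_pos (h x (by simp))]
      rw [ih (acc ++ [x]) (fun w hw => h w (by simp [hw]))]
      simp

lemma pvSpans_keep (cs : List Char) :
    ∀ w ∈ pvSpans cs 0, PySem.Chars.strip (PySem.List.slice cs (some w.1) (some w.2)) ≠ [] := by
  intro w hw
  unfold pvSpans at hw
  rcases List.mem_map.mp hw with ⟨⟨q, ww⟩, hmem, heq⟩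
  obtain ⟨k, hk, htk, hne, hns⟩ := pvWords_mem cs 0 q ww hmem
  rw [← heq]
  simp only
  rw [show q = (k : Int) from by omega, PySem.List.slice_natCast_add, htk,
      pvStrip_eq ww hns]
  exact hne

lemma pyRange_fold (w : List Char) : ∀ (a c : Int) (d : PySem.Dict Int Int),
    (PySem.List.pyRange a (a + (w.length : Int))).foldl
      (fun (st : PySem.Dict Int Int × Int) i => (st.1.insert i st.2, st.2 + 1)) (d, c)
      = (pvInsWord d a c w, c + (w.length : Int)) := by
  induction w with
  | nil => intro a c d; simp [pvInsWord]
  | cons x t ih =>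
      intro a c d
      rw [show ((x :: t).length : Int) = (t.length : Int) + 1 from by push_cast [List.length_cons]; ring]
      rw [PySem.List.pyRange_one_cons (by have : (0:Int) ≤ t.length := Int.natCast_nonneg _; omega)]
      simp only [List.foldl_cons]
      rw [show a + ((t.length : Int) + 1) = (a + 1) + (t.length : Int) from by ring]
      rw [ih (a + 1) (c + 1) (d.insert a c), pvInsWord]
      rw [show c + ((t.length : Int) + 1) = c + 1 + (t.length : Int) from by ring]

lemma pvFoldA (ws : List (Int × List Char)) :
    ∀ (s : Int) (d : PySem.Dict Int Int) (pos c0 : Int) (started : Bool) (buf : List Char),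
      c0 = (if started then pos + 1 else pos) →
      ((PySem.List.enumerate (ws.map (fun qw => (qw.1, qw.1 + (qw.2.length : Int)))) s).foldl
        (fun (st : PySem.Dict Int Int × Int) cw =>
          let st2 := (PySem.List.pyRange cw.2.1 cw.2.2).foldl
            (fun (st : PySem.Dict Int Int × Int) i => (st.1.insert i st.2, st.2 + 1)) st
          (st2.1, st2.2 + 1))
        (d, c0)).1
      = (pvRefGo ws d buf pos started).1 := by
  induction ws with
  | nil => intro s d pos c0 started buf _; simp [pvRefGo]
  | cons aw rest ih =>
      intro s d pos c0 started buf hc0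
      subst hc0
      obtain ⟨a, w⟩ := aw
      rw [List.map_cons, PySem.List.enumerate_cons]
      simp only [List.foldl_cons, pvRefGo]
      rw [pyRange_fold w a (if started then pos + 1 else pos) d]
      exact ih (s + 1) (pvInsWord d a (if started then pos + 1 else pos) w)
        ((if started then pos + 1 else pos) + (w.length : Int))
        ((if started then pos + 1 else pos) + (w.length : Int) + 1) true
        ((if started then buf ++ [' '] else buf) ++ w) (by simp)

lemma pvRefGo_buf (ws : List (Int × List Char)) :
    ∀ (d : PySem.Dict Int Int) (buf : List Char) (pos : Int) (started : Bool),
      (pvRefGo ws d buf pos started).2.1 =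
        buf ++ (if started = true ∧ ws ≠ [] then [' '] else []) ++
          PySem.Chars.join [' '] (ws.map (·.2)) := by
  induction ws with
  | nil => intro d buf pos started; simp [pvRefGo, PySem.Chars.join_nil]
  | cons aw rest ih =>
      intro d buf pos started
      obtain ⟨a, w⟩ := aw
      simp only [pvRefGo]
      rw [ih]
      cases rest with
      | nil =>
          simp only [List.map_cons, List.map_nil, PySem.Chars.join_singleton]
          cases started <;> simp [PySem.Chars.join_nil]
      | cons b t =>
          simp only [List.map_cons]
          rw [PySem.Chars.join_cons_cons]
          cases started <;> simp

lemma pvStr (cs : List Char) :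
    PySem.Chars.join [' ']
      ((pvSpans cs 0).map (fun w => PySem.List.slice cs (some w.1) (some w.2)))
      = (pvRefGo (pvWords cs 0) PySem.Dict.empty [] 0 false).2.1 := by
  rw [pvRefGo_buf, if_neg (by simp), List.nil_append, List.nil_append]
  unfold pvSpans
  rw [List.map_map]
  congr 1
  apply List.map_congr_left
  intro qw hqw
  obtain ⟨k, hk, htk, _, _⟩ := pvWords_mem cs 0 qw.1 qw.2 (by exact hqw)
  simp only [Function.comp_apply]
  rw [show qw.1 = (k : Int) from by omega, PySem.List.slice_natCast_add]
  exact htk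

lemma pvB2 (w : List Char) (hw : ∀ c ∈ w, PySem.Chars.isspace c = false) :
    ∀ (a : Int) (d : PySem.Dict Int Int) (buf : List Char) (pos : Int),
      (PySem.List.enumerate w a).foldl pvAltStep (d, buf, pos, true, true)
        = (pvInsWord d a pos w, buf ++ w, pos + (w.length : Int), true, true) := by
  induction w with
  | nil => intro a d buf pos; simp [PySem.List.enumerate, pvInsWord]
  | cons c t ih =>
      intro a d buf pos
      rw [PySem.List.enumerate_cons]
      simp only [List.foldl_cons]
      rw [show pvAltStep (d, buf, pos, true, true) (a, c)
            = (d.insert a pos, buf ++ [c], pos + 1, true, true) from by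
        simp [pvAltStep, hw c (by simp)]]
      rw [ih (fun x hx => hw x (by simp [hx])) (a + 1) (d.insert a pos) (buf ++ [c]) (pos + 1),
          pvInsWord]
      rw [show buf ++ c :: t = (buf ++ [c]) ++ t from by simp]
      rw [show pos + (((c :: t).length : Nat) : Int) = pos + 1 + (t.length : Int) from by
        push_cast [List.length_cons]; ring]

lemma pvB1 (cs : List Char) (p : Int) :
    ∀ (d : PySem.Dict Int Int) (buf : List Char) (pos : Int) (started prev : Bool),
    (prev = true → ∀ c ∈ cs.take 1, PySem.Chars.isspace c = true) →
    ∃ st2 pv2,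
      (PySem.List.enumerate cs p).foldl pvAltStep (d, buf, pos, started, prev)
        = ((pvRefGo (pvWords cs p) d buf pos started).1,
           (pvRefGo (pvWords cs p) d buf pos started).2.1,
           (pvRefGo (pvWords cs p) d buf pos started).2.2, st2, pv2) := by
  induction cs, p using pvWords.induct with
  | case1 p =>
      intro d buf pos started prev _
      exact ⟨started, prev, by simp [PySem.List.enumerate, pvWords, pvRefGo]⟩
  | case2 c cs p hc ih =>
      intro d buf pos started prev _
      rw [PySem.List.enumerate_cons]
      simp only [List.foldl_cons]
      rw [show pvAltStep (d, buf, pos, started, prev) (p, c)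
            = (d, buf, pos, started, false) from by simp [pvAltStep, hc]]
      rw [pvWords, if_pos hc]
      exact ih d buf pos started false (by simp)
  | case3 c cs p hc ih =>
      intro d buf pos started prev hpf
      have hcf : PySem.Chars.isspace c = false := by
        cases h : PySem.Chars.isspace c
        · rfl
        · exact absurd h (by simpa using hc)
      have hprev : prev = false := by
        cases hp : prev
        · rfl
        · have := hpf hp c (by simp)
          rw [hcf] at this; cases this
      subst hprev
      set tw := cs.takeWhile (fun x => !PySem.Chars.isspace x) with htw
      set dw := cs.dropWhile (fun x => !PySem.Chars.isspace x) with hdw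
      have hsplit : cs = tw ++ dw := by rw [htw, hdw, List.takeWhile_append_dropWhile]
      have htwns : ∀ x ∈ tw, PySem.Chars.isspace x = false := by
        intro x hx
        have := List.mem_takeWhile_imp hx; simpa using this
      rw [PySem.List.enumerate_cons]
      simp only [List.foldl_cons]
      have h2 := PySem.List.enumerate_append tw dw (p + 1)
      rw [← hsplit] at h2
      rw [h2, List.foldl_append]
      rw [show pvAltStep (d, buf, pos, started, false) (p, c)
            = (d.insert p (if started then pos + 1 else pos),
               (if started then buf ++ [' '] else buf) ++ [c],
               (if started then pos + 1 else pos) + 1, true, true) from by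
        cases started <;> simp [pvAltStep, hcf]]
      rw [pvB2 tw htwns (p + 1) _ _ _]
      obtain ⟨st2, pv2, hIH⟩ := ih (pvInsWord (d.insert p (if started then pos + 1 else pos))
          (p + 1) ((if started then pos + 1 else pos) + 1) tw)
        (((if started then buf ++ [' '] else buf) ++ [c]) ++ tw)
        ((if started then pos + 1 else pos) + 1 + (tw.length : Int)) true true
        (by
          intro _ c' hc'
          cases hdwc : dw with
          | nil => rw [hdwc] at hc'; simp at hc'
          | cons y ys =>
              rw [hdwc] at hc'
              simp only [List.take_succ_cons, List.take_zero, List.mem_singleton] at hc'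
              subst hc'
              have := pvDropWhile_head _ cs c' ys (by rw [← hdw, hdwc])
              simpa using this)
      refine ⟨st2, pv2, ?_⟩
      rw [hIH]
      rw [pvWords, if_neg hc]
      rw [show pvRefGo ((p, c :: tw) :: pvWords dw (p + 1 + (tw.length : Int))) d buf pos started
            = pvRefGo (pvWords dw (p + 1 + (tw.length : Int)))
                (pvInsWord (d.insert p (if started then pos + 1 else pos)) (p + 1)
                  ((if started then pos + 1 else pos) + 1) tw)
                (((if started then buf ++ [' '] else buf) ++ [c]) ++ tw)
                ((if started then pos + 1 else pos) + 1 + (tw.length : Int)) true from by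
        rw [pvRefGo, pvInsWord]
        congr 1
        · simp
        · simp only [List.length_cons]; push_cast; ring]

-- ===== VERDICT (by name: the statement is the Claim_ definition above) =====
theorem normalization_code_spec : Claim_equal_normalization_code := by
  intro code_src _
  unfold Spec_normalization_code
  dsimp only [normalization_code, normalization_code_alt]
  generalize code_src.toList = cs
  rw [pvSplit_runs cs, pvClean_keep cs (pvSpans cs 0) [] (pvSpans_keep cs), List.nil_append]
  obtain ⟨st2, pv2, hB⟩ := pvB1 cs 0 PySem.Dict.empty [] 0 false false (by simp)
  rw [hB]
  refine congrArg₂ Prod.mk ?_ ?_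
  · exact congrArg PySem.Dict.items
      (pvFoldA (pvWords cs 0) 0 PySem.Dict.empty 0 0 false [] (by simp))
  · exact congrArg String.ofList (pvStr cs)
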